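-- pv_equiv track=rewrite | github.com/glitchcore/youandme | sid_sim.py | is_get_master_signal
-- ===== SOURCE A (Python) =====
-- MIN_LEN_ACTIVE_SIGNAL = 4
--
-- def is_get_master_signal(pin_states):
--     result = False
--     signal_length = 0
--     max_signal_length = 0
--
--     for i in range(len(pin_states)):
--         if pin_states[i] == 1:
--             signal_length += 1
--         if pin_states[i] == 0 or i == len(pin_states) - 1:
--             if signal_length > max_signal_length:
--                 max_signal_length = signal_length
--             signal_length = 0
--
--     if max_signal_length >= MIN_LEN_ACTIVE_SIGNAL:
--         result = True
--
--     return result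
-- ===== SOURCE B (Python) =====
-- MIN_LEN_ACTIVE_SIGNAL = 4
--
-- def is_get_master_signal(pin_states):
--     segments = []
--     current = []
--     for x in pin_states:
--         if x == 0:
--             segments.append(current)
--             current = []
--         else:
--             current.append(x)
--     segments.append(current)
--     return any(seg.count(1) >= MIN_LEN_ACTIVE_SIGNAL for seg in segments)
-- ===== Notes on version B (the rewrite author's own statement) =====
-- stated objective: simpler
-- what changed: Replaced A's index loop carrying a running signal-length and running max with a one-pass split of the list into zero-delimited segments followed by any(seg.count(1) >= 4 for seg in segments).
import Mathlib
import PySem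

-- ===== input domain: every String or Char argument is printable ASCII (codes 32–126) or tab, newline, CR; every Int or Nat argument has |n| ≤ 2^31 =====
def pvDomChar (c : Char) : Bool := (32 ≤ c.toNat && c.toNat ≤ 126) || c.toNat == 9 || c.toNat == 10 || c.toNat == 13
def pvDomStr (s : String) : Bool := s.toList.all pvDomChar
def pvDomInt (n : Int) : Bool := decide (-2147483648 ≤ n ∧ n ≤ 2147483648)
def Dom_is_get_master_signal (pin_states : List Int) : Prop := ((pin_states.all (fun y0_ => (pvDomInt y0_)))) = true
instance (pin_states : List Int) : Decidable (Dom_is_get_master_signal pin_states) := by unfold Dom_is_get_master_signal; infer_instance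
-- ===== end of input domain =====

-- B splits the list into zero-delimited segments in one pass and then asks whether any
-- segment contains ≥ 4 ones — a different decomposition of A's indexed running-max loop
-- (objective: simpler; same O(n) cost).

-- ===== PORT A =====
-- loop body of A's `for i in range(len(pin_states))`
def pvBodyA (xs : List Int) (st : Int × Int) (i : Int) : Int × Int :=
  let sl := if PySem.List.pyGetD xs i 0 == 1 then st.1 + 1 else st.1
  if PySem.List.pyGetD xs i 0 == 0 || i == (xs.length : Int) - 1 then
    (0, if sl > st.2 then sl else st.2)
  else
    (sl, st.2)

def is_get_master_signal (pin_states : List Int) : Bool :=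
  -- result = False; signal_length = 0; max_signal_length = 0; for i in range(len(...)): ...
  let st := (PySem.List.pyRange 0 (pin_states.length : Int) 1).foldl (pvBodyA pin_states) (0, 0)
  -- if max_signal_length >= MIN_LEN_ACTIVE_SIGNAL: result = True
  decide (st.2 ≥ 4)

-- ===== PORT B =====
-- one pass: split on zeros, keeping every non-zero element in the current segment
def pvSplitGo : List Int → List Int → List (List Int) → List (List Int)
  | [], cur, acc => acc ++ [cur]
  | x :: rest, cur, acc =>
      if x == 0 then pvSplitGo rest [] (acc ++ [cur]) else pvSplitGo rest (cur ++ [x]) acc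

def is_get_master_signal_alt (pin_states : List Int) : Bool :=
  (pvSplitGo pin_states [] []).any (fun seg => decide (PySem.List.count seg 1 ≥ 4))

-- ===== PRECONDITION & SPEC =====
def Spec_is_get_master_signal (pin_states : List Int) (out : Bool) : Prop := out = is_get_master_signal_alt pin_states
instance (pin_states : List Int) (out : Bool) : Decidable (Spec_is_get_master_signal pin_states out) := by unfold Spec_is_get_master_signal; infer_instance

-- ===== CLAIM (what is proved, stated in full; the proofs are below) =====
def Claim_equal_is_get_master_signal : Prop := ∀ (pin_states : List Int), Dom_is_get_master_signal pin_states → Spec_is_get_master_signal pin_states (is_get_master_signal pin_states)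

-- ===== LEMMAS AND PROOFS =====

-- structural-recursion form of A's indexed loop (proof helper only)
def pvLoopA : List Int → Int × Int → Int × Int
  | [], st => st
  | x :: rest, st =>
      let sl := if x == 1 then st.1 + 1 else st.1
      if x == 0 || rest.isEmpty then pvLoopA rest (0, if sl > st.2 then sl else st.2)
      else pvLoopA rest (sl, st.2)

theorem pvFoldA (suf : List Int) : ∀ (pre : List Int) (st : Int × Int),
    (PySem.List.pyRange (pre.length : Int) (((pre ++ suf).length : Int)) 1).foldl
      (pvBodyA (pre ++ suf)) st = pvLoopA suf st := by
  induction suf with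
  | nil =>
      intro pre st
      simp [PySem.List.pyRange_one_eq_nil, pvLoopA]
  | cons x rest ih =>
      intro pre st
      have hlt : (pre.length : Int) < ((pre ++ x :: rest).length : Int) := by simp
      rw [PySem.List.pyRange_one_cons hlt]
      have hget : PySem.List.pyGetD (pre ++ x :: rest) (pre.length : Int) 0 = x := by
        simp [PySem.List.pyGetD_natCast, List.getD_eq_getElem?_getD]
      have hlast : ((pre.length : Int) == ((pre ++ x :: rest).length : Int) - 1) =
          rest.isEmpty := by
        cases rest with
        | nil => simp
        | cons y t => simp; omega
      have hre : pre ++ x :: rest = (pre ++ [x]) ++ rest := by simp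
      have hlen : ((pre ++ [x]).length : Int) = (pre.length : Int) + 1 := by simp
      simp only [List.foldl_cons, pvBodyA, hget, hlast]
      rw [hre, ← hlen, ih (pre ++ [x])]
      rw [apply_ite (pvLoopA rest)]
      simp only [pvLoopA]

theorem pvFoldA0 (xs : List Int) (st : Int × Int) :
    (PySem.List.pyRange 0 (xs.length : Int) 1).foldl (pvBodyA xs) st = pvLoopA xs st := by
  have h := pvFoldA xs [] st
  simpa using h

theorem pvSplitGo_acc (xs : List Int) : ∀ (cur : List Int) (acc : List (List Int)),
    pvSplitGo xs cur acc = acc ++ pvSplitGo xs cur [] := by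
  induction xs with
  | nil => intro cur acc; simp [pvSplitGo]
  | cons x rest ih =>
      intro cur acc
      by_cases hx : (x == (0:Int)) = true
      · simp only [pvSplitGo, hx, if_true]
        rw [ih [] (acc ++ [cur]), ih [] ([] ++ [cur])]
        simp
      · simp only [pvSplitGo, hx]
        exact ih (cur ++ [x]) acc

theorem pvCount_snoc (cur : List Int) (x : Int) :
    ((PySem.List.count (cur ++ [x]) 1 : Int)) =
      (if (x == (1:Int)) = true then ((PySem.List.count cur 1 : Int)) + 1
       else ((PySem.List.count cur 1 : Int))) := by
  by_cases h : x = 1 <;> simp [PySem.List.count, List.count_append, h]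

theorem pvFlush (a mx : Int) :
    decide ((if a > mx then a else mx) ≥ 4) = (decide (mx ≥ 4) || decide (a ≥ 4)) := by
  split_ifs with h <;> by_cases h4a : a ≥ 4 <;> by_cases h4m : mx ≥ 4 <;> simp [h4a, h4m] <;> omega

theorem pvCastGe (c : Nat) : decide (((c : Int)) ≥ 4) = decide (c ≥ 4) := by
  rw [decide_eq_decide]; omega

theorem pvLoopA_segs (xs : List Int) : ∀ (cur : List Int) (mx : Int), xs ≠ [] →
    decide ((pvLoopA xs ((PySem.List.count cur 1 : Int), mx)).2 ≥ 4) =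
      (decide (mx ≥ 4) ||
        (pvSplitGo xs cur []).any (fun seg => decide (PySem.List.count seg 1 ≥ 4))) := by
  induction xs with
  | nil => intro _ _ h; exact absurd rfl h
  | cons x rest ih =>
      intro cur mx _
      simp only [pvLoopA, ← pvCount_snoc]
      by_cases hx0 : (x == (0:Int)) = true
      · have hx1 : (x == (1:Int)) = false := by
          have : x = 0 := by simpa using hx0
          simp [this]
        have hc0 : ((PySem.List.count (cur ++ [x]) 1 : Int)) =
            ((PySem.List.count cur 1 : Int)) := by rw [pvCount_snoc, hx1]; simp
        simp only [hx0, Bool.true_or, if_true, hc0, pvSplitGo]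
        cases rest with
        | nil =>
            show decide ((if ((PySem.List.count cur 1 : Int)) > mx
                then ((PySem.List.count cur 1 : Int)) else mx) ≥ 4) =
              (decide (mx ≥ 4) ||
                (pvSplitGo [] [] ([] ++ [cur])).any
                  (fun seg => decide (PySem.List.count seg 1 ≥ 4)))
            rw [pvFlush, pvCastGe]
            simp [pvSplitGo, PySem.List.count]
        | cons y t =>
            have h := ih [] (if ((PySem.List.count cur 1 : Int)) > mx
                then ((PySem.List.count cur 1 : Int)) else mx) (by simp)
            rw [show ((PySem.List.count ([] : List Int) 1 : Int)) = 0 from by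
              simp [PySem.List.count]] at h
            rw [h, pvSplitGo_acc (y :: t) [] ([] ++ [cur])]
            simp only [pvFlush, pvCastGe]
            simp [Bool.or_assoc]
      · simp only [hx0, Bool.false_or, pvSplitGo]
        cases rest with
        | nil =>
            show decide ((if ((PySem.List.count (cur ++ [x]) 1 : Int)) > mx
                then ((PySem.List.count (cur ++ [x]) 1 : Int)) else mx) ≥ 4) =
              (decide (mx ≥ 4) ||
                [cur ++ [x]].any (fun seg => decide (PySem.List.count seg 1 ≥ 4)))
            rw [pvFlush, pvCastGe]
            simp
        | cons y t =>
            simp only [List.isEmpty_cons]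
            exact ih (cur ++ [x]) mx (by simp)

-- ===== VERDICT (by name: the statement is the Claim_ definition above) =====
theorem is_get_master_signal_spec : Claim_equal_is_get_master_signal := by
  unfold Claim_equal_is_get_master_signal
  intro xs _
  unfold Spec_is_get_master_signal
  cases xs with
  | nil => decide
  | cons x rest =>
      show decide ((((PySem.List.pyRange 0 ((x :: rest).length : Int) 1).foldl
          (pvBodyA (x :: rest)) (0, 0)).2 : Int) ≥ 4) = is_get_master_signal_alt (x :: rest)
      rw [pvFoldA0]
      have h := pvLoopA_segs (x :: rest) [] 0 (by simp)
      rw [show ((PySem.List.count ([] : List Int) 1 : Int)) = 0 from by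
        simp [PySem.List.count]] at h
      rw [h]
      simp [is_get_master_signal_alt]
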